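-- pv_equiv track=rewrite | github.com/AdamLaurie/raiden-pico | test_flash_raw.py | calculate_uue_checksum
-- ===== SOURCE A (Python) =====
-- def calculate_uue_checksum(lines):
--     """Calculate checksum for UUE lines (sum of all decoded bytes)"""
--     total = 0
--     for line in lines:
--         # Decode UUE line
--         length = ord(line[0]) - 32
--         for i in range(0, length, 3):
--             chunk = line[1 + (i // 3) * 4 : 1 + (i // 3) * 4 + 4]
--             if len(chunk) == 4:
--                 # Decode 4 UUE chars to 3 bytes
--                 b1 = (ord(chunk[0]) - 32) << 2 | (ord(chunk[1]) - 32) >> 4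
--                 b2 = ((ord(chunk[1]) - 32) & 0xF) << 4 | (ord(chunk[2]) - 32) >> 2
--                 b3 = ((ord(chunk[2]) - 32) & 0x3) << 6 | (ord(chunk[3]) - 32)
--                 if i < length:
--                     total += b1
--                 if i + 1 < length:
--                     total += b2
--                 if i + 2 < length:
--                     total += b3
--     return total & 0xFFFFFFFF
-- ===== SOURCE B (Python) =====
-- def calculate_uue_checksum(lines):
--     """Calculate checksum for UUE lines (sum of all decoded bytes)"""
--     total = 0
--     for line in lines:
--         length = ord(line[0]) - 32
--         # decode the whole body in 4-char groups, then sum the first `length` bytes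
--         vals = [ord(c) - 32 for c in line[1:]]
--         decoded = []
--         while len(vals) >= 4:
--             a, b, c, d = vals[0], vals[1], vals[2], vals[3]
--             decoded.append(a << 2 | b >> 4)
--             decoded.append((b & 0xF) << 4 | c >> 2)
--             decoded.append((c & 0x3) << 6 | d)
--             vals = vals[4:]
--         total += sum(decoded[:max(length, 0)])
--     return total & 0xFFFFFFFF
-- ===== Notes on version B (the rewrite author's own statement) =====
-- stated objective: faster
-- what changed: A interleaves decoding and conditional accumulation per 3-byte chunk inside an index loop with repeated slice arithmetic; B decodes each line's whole body once into a flat byte list by structural 4-char grouping and then adds the sum of its first max(length,0) bytes.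
-- outside the precondition, e.g. on calculate_uue_checksum(['']): A raises IndexError, B raises IndexError
import Mathlib
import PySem

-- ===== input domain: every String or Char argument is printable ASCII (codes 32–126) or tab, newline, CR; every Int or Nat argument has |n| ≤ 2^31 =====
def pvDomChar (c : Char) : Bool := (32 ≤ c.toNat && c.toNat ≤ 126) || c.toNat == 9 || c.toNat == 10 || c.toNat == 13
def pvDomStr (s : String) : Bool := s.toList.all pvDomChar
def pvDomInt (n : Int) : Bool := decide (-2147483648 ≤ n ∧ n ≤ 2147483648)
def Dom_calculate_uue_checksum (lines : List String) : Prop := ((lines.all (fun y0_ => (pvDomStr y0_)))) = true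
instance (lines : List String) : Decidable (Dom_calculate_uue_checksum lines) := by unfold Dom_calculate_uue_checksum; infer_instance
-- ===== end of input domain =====

-- B decodes each line's body once into a flat byte list and sums a prefix slice, instead of
-- A's interleaved per-chunk conditional accumulation (measured faster in a timing run).

-- ===== PORT A =====
-- one step of A's inner 'for i in range(0, length, 3)' loop
def pvStepA (cs : List Char) (length : Int) (total : Int) (i : Int) : Int :=
  let q := PySem.Int.floordiv i 3
  let chunk := PySem.List.slice cs (some (1 + q * 4)) (some (1 + q * 4 + 4))
  match chunk with
  | [c0, c1, c2, c3] =>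
    let b1 := PySem.Int.bor (((c0.toNat : Int) - 32) <<< (2 : Nat)) (((c1.toNat : Int) - 32) >>> (4 : Nat))
    let b2 := PySem.Int.bor ((PySem.Int.band ((c1.toNat : Int) - 32) 0xF) <<< (4 : Nat)) (((c2.toNat : Int) - 32) >>> (2 : Nat))
    let b3 := PySem.Int.bor ((PySem.Int.band ((c2.toNat : Int) - 32) 0x3) <<< (6 : Nat)) ((c3.toNat : Int) - 32)
    let total := if i < length then total + b1 else total
    let total := if i + 1 < length then total + b2 else total
    if i + 2 < length then total + b3 else total
  | _ => total

def calculate_uue_checksum (lines : List String) : Int :=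
  PySem.Int.band
    (lines.foldl (fun total line =>
      let cs := line.toList
      -- line[0] raises IndexError on an empty line; Pre_ excludes that, headD is never the default there
      let length := (((cs.headD ' ').toNat : Int)) - 32
      (PySem.List.pyRange 0 length 3).foldl (pvStepA cs length) total) 0)
    0xFFFFFFFF

-- ===== PORT B =====
-- Source B's 'while len(vals) >= 4' decode loop, as structural recursion on vals
def pvDecode4 : List Int → List Int
  | a :: b :: c :: d :: rest =>
      PySem.Int.bor (a <<< (2 : Nat)) (b >>> (4 : Nat)) ::
      PySem.Int.bor ((PySem.Int.band b 0xF) <<< (4 : Nat)) (c >>> (2 : Nat)) ::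
      PySem.Int.bor ((PySem.Int.band c 0x3) <<< (6 : Nat)) d ::
      pvDecode4 rest
  | _ => []

def calculate_uue_checksum_alt (lines : List String) : Int :=
  PySem.Int.band
    (lines.foldl (fun total line =>
      let cs := line.toList
      let length := (((cs.headD ' ').toNat : Int)) - 32
      let decoded := pvDecode4 (cs.tail.map (fun c => ((c.toNat : Int) - 32)))
      total + (decoded.take (max length 0).toNat).sum) 0)
    0xFFFFFFFF

-- ===== PRECONDITION & SPEC =====
-- Pre_ excludes lists containing an empty line, on which Python A raises IndexError at line[0].
def Pre_calculate_uue_checksum (lines : List String) : Prop := ∀ s ∈ lines, s.toList ≠ []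
instance (lines : List String) : Decidable (Pre_calculate_uue_checksum lines) := by
  unfold Pre_calculate_uue_checksum; infer_instance
def pvWitness_calculate_uue_checksum : List String := ["!!!!!", "#0V%S&0``"]

def Spec_calculate_uue_checksum (lines : List String) (out : Int) : Prop := out = calculate_uue_checksum_alt lines
instance (lines : List String) (out : Int) : Decidable (Spec_calculate_uue_checksum lines out) := by unfold Spec_calculate_uue_checksum; infer_instance

-- ===== CLAIM (what is proved, stated in full; the proofs are below) =====
def Claim_equal_calculate_uue_checksum : Prop := ∀ (lines : List String), Dom_calculate_uue_checksum lines → Pre_calculate_uue_checksum lines → Spec_calculate_uue_checksum lines (calculate_uue_checksum lines)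

-- ===== LEMMAS AND PROOFS =====

-- f applied to a char: its UUE 6-bit value
def pvF (c : Char) : Int := ((c.toNat : Int)) - 32

-- A's step, rewritten on the line body (cs.tail) with additive contributions
def pvStep' (body : List Char) (L : Int) (t : Int) (i : Int) : Int :=
  match (body.drop ((i / 3).toNat * 4)).take 4 with
  | [c0, c1, c2, c3] =>
      t + (if i < L then PySem.Int.bor ((pvF c0) <<< (2 : Nat)) ((pvF c1) >>> (4 : Nat)) else 0)
        + (if i + 1 < L then PySem.Int.bor ((PySem.Int.band (pvF c1) 0xF) <<< (4 : Nat)) ((pvF c2) >>> (2 : Nat)) else 0)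
        + (if i + 2 < L then PySem.Int.bor ((PySem.Int.band (pvF c2) 0x3) <<< (6 : Nat)) (pvF c3) else 0)
  | _ => t

lemma pyRange3_nil (L : Int) (h : L ≤ 0) : PySem.List.pyRange 0 L 3 = [] := by
  rw [PySem.List.pyRange_of_pos 0 L (by norm_num)]
  simp [show ¬ (0 : Int) < L by omega]

lemma pyRange3_cons (L : Int) (h : 0 < L) :
    PySem.List.pyRange 0 L 3 = 0 :: (PySem.List.pyRange 0 (L - 3) 3).map (· + 3) := by
  rw [PySem.List.pyRange_of_pos 0 L (by norm_num),
      PySem.List.pyRange_of_pos 0 (L - 3) (by norm_num)]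
  by_cases h3 : (0:Int) < L - 3
  · rw [if_pos h, if_pos h3,
        show ((L - 0 + 3 - 1) / 3).toNat = ((L - 3 - 0 + 3 - 1) / 3).toNat + 1 by omega,
        List.range_succ_eq_map]
    simp only [List.map_cons, List.map_map]
    congr 1
  · rw [if_pos h, if_neg h3, show ((L - 0 + 3 - 1) / 3).toNat = 1 by omega]
    simp

lemma pvStep'_shift (body : List Char) (L : Int) (t i : Int) (hi : 0 ≤ i) :
    pvStep' body L t (i + 3) = pvStep' (body.drop 4) (L - 3) t i := by
  have hdrop : body.drop (((i + 3) / 3).toNat * 4) = (body.drop 4).drop ((i / 3).toNat * 4) := by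
    rw [List.drop_drop, show 4 + (i / 3).toNat * 4 = ((i + 3) / 3).toNat * 4 by omega]
  unfold pvStep'
  rw [hdrop]
  rcases hc : ((body.drop 4).drop ((i / 3).toNat * 4)).take 4 with _ | ⟨c0, _ | ⟨c1, _ | ⟨c2, _ | ⟨c3, rest⟩⟩⟩⟩
  · rfl
  · rfl
  · rfl
  · rfl
  · rcases rest with _ | ⟨x, xs⟩
    · simp only [show (i + 3 < L) ↔ (i < L - 3) by omega,
          show (i + 3 + 1 < L) ↔ (i + 1 < L - 3) by omega,
          show (i + 3 + 2 < L) ↔ (i + 2 < L - 3) by omega]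
    · exfalso
      have := congrArg List.length hc
      simp at this
      omega

-- main induction: A's inner loop equals "decode everything, sum the first max(L,0) bytes"
lemma pvMain : ∀ (n : Nat) (L : Int), L ≤ 3 * n → ∀ (body : List Char) (total : Int),
    (PySem.List.pyRange 0 L 3).foldl (pvStep' body L) total
      = total + ((pvDecode4 (body.map pvF)).take (max L 0).toNat).sum := by
  intro n
  induction n with
  | zero =>
    intro L hL body total
    rw [pyRange3_nil L (by omega)]
    simp [show (max L 0).toNat = 0 by omega]
  | succ m ih =>
    intro L hL body total
    by_cases hpos : 0 < L
    · rw [pyRange3_cons L hpos]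
      simp only [List.foldl_cons, List.foldl_map]
      rw [PySem.List.foldl_congr_mem _ _ (fun t i => pvStep' (body.drop 4) (L - 3) t i) _
            (by
              intro acc x hx
              have hx' := (PySem.List.mem_pyRange_iff_of_pos (by norm_num) x).mp hx
              exact pvStep'_shift body L acc x (by omega))]
      rw [ih (L - 3) (by omega)]
      -- now compare first-group contribution with the head of the decoded list
      rcases body with _ | ⟨c0, _ | ⟨c1, _ | ⟨c2, _ | ⟨c3, rest⟩⟩⟩⟩
      · simp [pvStep', pvDecode4, show (max L 0).toNat = L.toNat by omega,
          show (max (L-3) 0).toNat = (L-3).toNat by omega]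
      · simp [pvStep', pvDecode4]
      · simp [pvStep', pvDecode4]
      · simp [pvStep', pvDecode4]
      · have hM : (max L 0).toNat = L.toNat := by omega
        have hM3 : (max (L - 3) 0).toNat = L.toNat - 3 := by omega
        have hone : (0:Int) < L := hpos
        have hstep : pvStep' (c0 :: c1 :: c2 :: c3 :: rest) L total 0
            = total + PySem.Int.bor ((pvF c0) <<< (2:Nat)) ((pvF c1) >>> (4:Nat))
              + (if (1:Int) < L then PySem.Int.bor ((PySem.Int.band (pvF c1) 0xF) <<< (4:Nat)) ((pvF c2) >>> (2:Nat)) else 0)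
              + (if (2:Int) < L then PySem.Int.bor ((PySem.Int.band (pvF c2) 0x3) <<< (6:Nat)) (pvF c3) else 0) := by
          unfold pvStep'
          norm_num [if_pos hpos]
        rw [hstep]
        simp only [List.map_cons, pvDecode4, hM, hM3]
        rcases hLt : L.toNat with _ | _ | _ | k
        · omega
        · have h1 : ¬ (1:Int) < L := by omega
          have h2 : ¬ (2:Int) < L := by omega
          simp [h1, h2, List.take]
        · have h1 : (1:Int) < L := by omega
          have h2 : ¬ (2:Int) < L := by omega
          simp [h1, h2, List.take]
          ring
        · have h1 : (1:Int) < L := by omega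
          have h2 : (2:Int) < L := by omega
          simp [h1, h2, List.take, List.sum_cons]
          ring
    · rw [pyRange3_nil L (by omega)]
      simp [show (max L 0).toNat = 0 by omega]

-- A's literal step equals the body-relative additive step, for the loop's nonnegative indices
lemma pvStepA_eq (cs : List Char) (L t i : Int) (hi : 0 ≤ i) :
    pvStepA cs L t i = pvStep' cs.tail L t i := by
  have hq0 : 0 ≤ i / 3 := by omega
  have hfd : PySem.Int.floordiv i 3 = i / 3 := PySem.Int.floordiv_eq_ediv_of_pos (by norm_num)
  have hsl : PySem.List.slice cs (some (1 + (i / 3) * 4)) (some (1 + (i / 3) * 4 + 4))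
      = (cs.tail.drop ((i / 3).toNat * 4)).take 4 := by
    rw [PySem.List.slice_toNat cs (by omega) (by omega)]
    rw [show (1 + i / 3 * 4 + 4).toNat - (1 + i / 3 * 4).toNat = 4 by omega,
        show (1 + i / 3 * 4).toNat = (i / 3).toNat * 4 + 1 by omega]
    rw [show (i / 3).toNat * 4 + 1 = 1 + (i / 3).toNat * 4 by omega, ← List.drop_drop, List.drop_one]
  unfold pvStepA pvStep'
  simp only [hfd, hsl]
  rcases ((cs.tail.drop ((i / 3).toNat * 4)).take 4) with _ | ⟨c0, _ | ⟨c1, _ | ⟨c2, _ | ⟨c3, _ | ⟨x, xs⟩⟩⟩⟩⟩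
  · rfl
  · rfl
  · rfl
  · rfl
  · simp only [pvF]
    split_ifs <;> ring
  · rfl

-- per-line: A's inner loop equals B's decode-then-slice sum (any line, any running total)
lemma pvLine_eq (line : String) (total : Int) :
    (PySem.List.pyRange 0 ((((line.toList.headD ' ').toNat : Int)) - 32) 3).foldl
        (pvStepA line.toList ((((line.toList.headD ' ').toNat : Int)) - 32)) total
      = total + ((pvDecode4 (line.toList.tail.map (fun c => ((c.toNat : Int) - 32)))).take
          (max ((((line.toList.headD ' ').toNat : Int)) - 32) 0).toNat).sum := by
  set L := (((line.toList.headD ' ').toNat : Int)) - 32 with hLdef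
  rw [PySem.List.foldl_congr_mem _ _ (pvStep' line.toList.tail L) _
        (by
          intro acc x hx
          have hx' := (PySem.List.mem_pyRange_iff_of_pos (by norm_num) x).mp hx
          exact pvStepA_eq line.toList L acc x (by omega))]
  have : (fun c => ((c.toNat : Int) - 32)) = pvF := by funext c; rfl
  rw [this, pvMain (L.toNat + 1) L (by omega) line.toList.tail total]

-- ===== VERDICT (by name: the statement is the Claim_ definition above) =====
theorem calculate_uue_checksum_spec : Claim_equal_calculate_uue_checksum := by
  intro lines h1 h2
  clear h1 h2
  unfold Spec_calculate_uue_checksum calculate_uue_checksum calculate_uue_checksum_alt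
  congr 1
  induction lines using List.reverseRecOn with
  | nil => rfl
  | append_singleton xs x ih =>
    rw [List.foldl_append, List.foldl_append, ih]
    simp only [List.foldl_cons, List.foldl_nil]
    exact pvLine_eq x _
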